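-- pv_equiv track=rewrite | github.com/ochensad/CG | lab_5_py/main.py | find_y
-- ===== SOURCE A (Python) =====
-- def find_y(ed):
--     y_max = None
--     y_min = None
--     for i in range(len(ed)):
--         if y_max is None or ed[i][1] > y_max:
--             y_max = ed[i][1]
--
--         if y_max is None or ed[i][3] > y_max:
--             y_max = ed[i][3]
--
--         if y_min is None or ed[i][1] < y_min:
--             y_min = ed[i][1]
--
--         if y_min is None or ed[i][3] < y_min:
--             y_min = ed[i][3]
--
--     return y_max, y_min
-- ===== SOURCE B (Python) =====
-- def find_y(ed):
--     ys = sorted(y for e in ed for y in (e[1], e[3]))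
--     if not ys:
--         return None, None
--     return ys[-1], ys[0]
-- ===== Notes on version B (the rewrite author's own statement) =====
-- stated objective: alternative
-- what changed: Sorts all flattened y-coordinates once and reads the extremes off the ends of the sorted list (ys[-1], ys[0]), instead of A's single pass with four running max/min update branches.
import Mathlib
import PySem

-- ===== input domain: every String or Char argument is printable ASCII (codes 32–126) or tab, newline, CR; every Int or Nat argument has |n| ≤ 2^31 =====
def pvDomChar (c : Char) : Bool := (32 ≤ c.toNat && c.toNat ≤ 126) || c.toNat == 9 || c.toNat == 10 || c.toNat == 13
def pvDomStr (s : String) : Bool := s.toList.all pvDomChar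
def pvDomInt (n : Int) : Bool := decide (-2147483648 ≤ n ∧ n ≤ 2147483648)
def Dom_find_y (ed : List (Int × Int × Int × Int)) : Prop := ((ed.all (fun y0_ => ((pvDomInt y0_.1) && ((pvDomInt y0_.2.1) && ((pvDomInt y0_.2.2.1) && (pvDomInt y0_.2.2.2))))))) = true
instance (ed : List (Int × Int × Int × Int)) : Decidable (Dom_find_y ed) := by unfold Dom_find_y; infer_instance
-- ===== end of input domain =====

-- B sorts the flattened y-values once and returns the two ends of the sorted list,
-- replacing A's single-pass running max/min loop: a different (sort-based) algorithm.


-- ===== PORT A =====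
-- A's loop body: four if-branches in order, updating the running (y_max, y_min).
def find_y_step (st : Option Int × Option Int) (e : Int × Int × Int × Int) :
    Option Int × Option Int :=
  let ymax := st.1
  let ymin := st.2
  -- if y_max is None or ed[i][1] > y_max: y_max = ed[i][1]
  let ymax := if ymax.elim true (fun v => decide (e.2.1 > v)) then some e.2.1 else ymax
  -- if y_max is None or ed[i][3] > y_max: y_max = ed[i][3]
  let ymax := if ymax.elim true (fun v => decide (e.2.2.2 > v)) then some e.2.2.2 else ymax
  -- if y_min is None or ed[i][1] < y_min: y_min = ed[i][1]
  let ymin := if ymin.elim true (fun v => decide (e.2.1 < v)) then some e.2.1 else ymin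
  -- if y_min is None or ed[i][3] < y_min: y_min = ed[i][3]
  let ymin := if ymin.elim true (fun v => decide (e.2.2.2 < v)) then some e.2.2.2 else ymin
  (ymax, ymin)

def find_y (ed : List (Int × Int × Int × Int)) : Option Int × Option Int :=
  ed.foldl find_y_step (none, none)

-- ===== PORT B =====
def find_y_alt (ed : List (Int × Int × Int × Int)) : Option Int × Option Int :=
  let ys := PySem.List.sorted (ed.flatMap (fun e => [e.2.1, e.2.2.2])) (fun y => y) false
  if ys = [] then (none, none)
  else (PySem.List.pyGet? ys (-1), PySem.List.pyGet? ys 0)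

-- ===== PRECONDITION & SPEC =====
def Spec_find_y (ed : List (Int × Int × Int × Int)) (out : Option Int × Option Int) : Prop := out = find_y_alt ed
instance (ed : List (Int × Int × Int × Int)) (out : Option Int × Option Int) : Decidable (Spec_find_y ed out) := by unfold Spec_find_y; infer_instance

-- ===== CLAIM =====
def Claim_equal_find_y : Prop := ∀ (ed : List (Int × Int × Int × Int)), Dom_find_y ed → Spec_find_y ed (find_y ed)

-- ===== LEMMAS AND PROOFS =====

-- After starting values (a, b), A's loop computes running max/min of the flattened ys.
theorem find_y_foldl_some (ed : List (Int × Int × Int × Int)) (a b : Int) :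
    ed.foldl find_y_step (some a, some b)
      = (some ((ed.flatMap (fun e => [e.2.1, e.2.2.2])).foldl max a),
         some ((ed.flatMap (fun e => [e.2.1, e.2.2.2])).foldl min b)) := by
  induction ed generalizing a b with
  | nil => simp
  | cons e t ih =>
    simp only [List.foldl_cons, List.flatMap_cons, List.foldl_append]
    rw [show find_y_step (some a, some b) e
        = (some (max (max a e.2.1) e.2.2.2), some (min (min b e.2.1) e.2.2.2)) from by
      simp only [find_y_step, Option.elim, Prod.mk.injEq]
      split_ifs <;> simp_all <;> omega]
    rw [ih]
    simp [List.foldl]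

-- In a ≤-pairwise (ascending) list, every element is ≤ the last one.
theorem le_getLast_of_pairwise (s : List Int) (hp : s.Pairwise (· ≤ ·)) (hne : s ≠ [])
    (x : Int) (hx : x ∈ s) : x ≤ s.getLast hne := by
  induction s with
  | nil => exact absurd rfl hne
  | cons a t ih =>
    cases t with
    | nil => simp_all
    | cons b u =>
      rcases List.mem_cons.mp hx with rfl | hx'
      · exact le_trans (List.rel_of_pairwise_cons hp (List.getLast_mem _))
          (le_refl _)
      · exact ih (List.Pairwise.of_cons hp) (by simp) hx'

theorem find_y_spec : Claim_equal_find_y := by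
  intro ed _
  unfold Spec_find_y find_y find_y_alt
  cases ed with
  | nil => simp [PySem.List.sorted_eq_nil_iff]
  | cons e t =>
    simp only [List.foldl_cons, List.flatMap_cons]
    rw [show find_y_step (none, none) e
        = (some (max e.2.1 e.2.2.2), some (min e.2.1 e.2.2.2)) from by
      simp only [find_y_step, Option.elim, Prod.mk.injEq]
      split_ifs <;> simp_all <;> try omega]
    rw [find_y_foldl_some]
    simp only [List.cons_append, List.nil_append]
    -- ys is the nonempty flattened list, s its sorted version
    set ys : List Int := e.2.1 :: e.2.2.2 :: t.flatMap (fun e => [e.2.1, e.2.2.2]) with hys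
    have hysne : ys ≠ [] := by simp [hys]
    set s : List Int := PySem.List.sorted ys (fun y => y) false with hs
    have hsne : s ≠ [] := by
      simp [hs, PySem.List.sorted_eq_nil_iff, hysne]
    have hperm : s.Perm ys := PySem.List.sorted_perm ..
    have hpw : s.Pairwise (· ≤ ·) := by
      have := PySem.List.sorted_pairwise (xs := ys) (key := fun y => y)
      simpa [hs] using this
    -- A's values, characterized via max?/min?
    have hmax : PySem.List.max? ys (fun y => y)
        = some ((t.flatMap (fun e => [e.2.1, e.2.2.2])).foldl max (max e.2.1 e.2.2.2)) := by
      rw [show ys = e.2.1 :: e.2.2.2 :: t.flatMap (fun e => [e.2.1, e.2.2.2]) from hys]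
      rw [PySem.List.max?_id_cons]; simp [List.foldl_cons]
    have hmin : PySem.List.min? ys (fun y => y)
        = some ((t.flatMap (fun e => [e.2.1, e.2.2.2])).foldl min (min e.2.1 e.2.2.2)) := by
      rw [show ys = e.2.1 :: e.2.2.2 :: t.flatMap (fun e => [e.2.1, e.2.2.2]) from hys]
      rw [PySem.List.min?_id_cons]; simp [List.foldl_cons]
    set M : Int := (t.flatMap (fun e => [e.2.1, e.2.2.2])).foldl max (max e.2.1 e.2.2.2)
    set m : Int := (t.flatMap (fun e => [e.2.1, e.2.2.2])).foldl min (min e.2.1 e.2.2.2)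
    have hMmem : M ∈ ys := PySem.List.max?_mem hmax
    have hMmax : ∀ y ∈ ys, y ≤ M := PySem.List.max?_isMax hmax
    have hmmem : m ∈ ys := PySem.List.min?_mem hmin
    have hmmin : ∀ y ∈ ys, m ≤ y := PySem.List.min?_isMin hmin
    -- B's ends of the sorted list
    obtain ⟨h0, ts, hcons⟩ := List.exists_cons_of_ne_nil hsne
    have hL : PySem.List.pyGet? s (-1) = some (s.getLast hsne) := by
      rw [PySem.List.pyGet?_neg_one, List.getLast?_eq_some_getLast hsne]
    have h0eq : PySem.List.pyGet? s 0 = some h0 := by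
      rw [hcons]; exact PySem.List.pyGet?_zero_cons ..
    -- last of s equals M
    have hLys : s.getLast hsne ∈ ys := hperm.subset (List.getLast_mem hsne)
    have hLmax : ∀ x ∈ s, x ≤ s.getLast hsne := le_getLast_of_pairwise s hpw hsne
    have hLeq : s.getLast hsne = M :=
      le_antisymm (hMmax _ hLys) (hLmax M (hperm.mem_iff.mpr hMmem))
    -- head of s equals m
    have h0ys : h0 ∈ ys := hperm.subset (by simp [hcons])
    have h0min : ∀ x ∈ ys, h0 ≤ x := by
      intro x hx
      exact PySem.List.key_head_sorted_le ys (fun y => y) hcons x hx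
    have h0eq' : h0 = m := le_antisymm (h0min m hmmem) (hmmin _ h0ys)
    rw [if_neg hsne, hL, h0eq, hLeq, h0eq']
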